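-- pv_equiv track=rewrite | github.com/dtblocker2/DSA | codeforces/Dec24/uninteresting number.py | is_divisible_by_9
-- ===== SOURCE A (Python) =====
-- def is_divisible_by_9(t, test_cases):
--     results = []
--
--     for n in test_cases:
--         # Calculate the sum of the digits of the number
--         digit_sum = sum(int(digit) for digit in n)
--
--         # Check if the current sum is already divisible by 9
--         if digit_sum % 9 == 0:
--             results.append("YES")
--             continue
--
--         # Check if replacing any digit x with x^2 can make the sum divisible by 9
--         found = False
--         for i, digit in enumerate(n):
--             original_digit = int(digit)
--             # Only consider digits 0, 1, 2, 3 as their squares are single digits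
--             if original_digit in [0, 1, 2, 3]:
--                 squared_digit = original_digit ** 2
--                 new_sum = digit_sum - original_digit + squared_digit
--                 if new_sum % 9 == 0:
--                     found = True
--                     results.append("YES")
--                     break
--
--         # If no replacement works, output "NO"
--         if not found:
--             results.append("NO")
--
--     return results
-- ===== SOURCE B (Python) =====
-- def is_divisible_by_9(t, test_cases):
--     # closed-form: only digits 2 and 3 change the digit sum usefully (+2, +6 mod 9)
--     def verdict(n):
--         digit_sum = sum(int(d) for d in n)
--         if digit_sum % 9 == 0:
--             return "YES"
--         if '2' in n and (digit_sum + 2) % 9 == 0: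
--             return "YES"
--         if '3' in n and (digit_sum + 6) % 9 == 0:
--             return "YES"
--         return "NO"
--     return [verdict(n) for n in test_cases]
-- ===== Notes on version B (the rewrite author's own statement) =====
-- stated objective: simpler
-- what changed: B replaces A's inner enumerate/break search over every digit position by a closed-form check: since squaring only helps for digits 2 (+2) and 3 (+6) mod 9, B tests membership of '2'/'3' and two modular conditions on the digit sum.
import Mathlib
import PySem

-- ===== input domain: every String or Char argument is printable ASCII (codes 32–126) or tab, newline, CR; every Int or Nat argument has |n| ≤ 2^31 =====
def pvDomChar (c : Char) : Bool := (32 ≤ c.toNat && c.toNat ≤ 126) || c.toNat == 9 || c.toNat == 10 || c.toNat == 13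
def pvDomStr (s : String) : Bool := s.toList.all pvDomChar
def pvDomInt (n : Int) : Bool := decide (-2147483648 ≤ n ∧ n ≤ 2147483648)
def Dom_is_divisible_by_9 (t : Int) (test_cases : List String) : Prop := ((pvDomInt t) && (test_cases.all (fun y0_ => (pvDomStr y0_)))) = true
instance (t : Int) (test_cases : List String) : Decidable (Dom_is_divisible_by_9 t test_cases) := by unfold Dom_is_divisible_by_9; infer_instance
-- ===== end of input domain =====

-- B replaces A's inner digit-position search loop by a closed-form modular check
-- ('2'/'3' membership plus two congruences on the digit sum); objective: simpler.

-- ===== PORT A =====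
-- int(digit) for a single character; none (Python ValueError on non-digits) is excluded by Pre_
def pvDigit (c : Char) : Int := (PySem.Int.ofChars? [c]).getD 0

-- A's inner 'for i, digit in enumerate(n): … break' search
def pvInnerA (ds : Int) : List Char → Bool
  | [] => false
  | c :: rest =>
    let d := pvDigit c
    if d = 0 ∨ d = 1 ∨ d = 2 ∨ d = 3 then
      if PySem.Int.mod (ds - d + d * d) 9 = 0 then true else pvInnerA ds rest
    else pvInnerA ds rest

def is_divisible_by_9 (t : Int) (test_cases : List String) : List String :=
  test_cases.foldl
    (fun results n =>
      let ds := n.toList.foldl (fun acc c => acc + pvDigit c) 0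
      if PySem.Int.mod ds 9 = 0 then results ++ ["YES"]
      else if pvInnerA ds n.toList then results ++ ["YES"]
      else results ++ ["NO"])
    []

-- ===== PORT B =====
def pvVerdictB (n : String) : String :=
  let ds := (n.toList.map pvDigit).sum
  if PySem.Int.mod ds 9 = 0 then "YES"
  else if n.toList.contains '2' && decide (PySem.Int.mod (ds + 2) 9 = 0) then "YES"
  else if n.toList.contains '3' && decide (PySem.Int.mod (ds + 6) 9 = 0) then "YES"
  else "NO"

def is_divisible_by_9_alt (t : Int) (test_cases : List String) : List String :=
  test_cases.map pvVerdictB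

-- ===== PRECONDITION & SPEC =====
-- Pre_ excludes exactly the inputs where Python's int(digit) raises ValueError
-- (any test-case string containing a non-digit character); both A and B raise there.
def Pre_is_divisible_by_9 (t : Int) (test_cases : List String) : Prop :=
  (test_cases.all (fun s => s.toList.all Char.isDigit)) = true
instance (t : Int) (test_cases : List String) : Decidable (Pre_is_divisible_by_9 t test_cases) := by
  unfold Pre_is_divisible_by_9; infer_instance

def pvWitness_is_divisible_by_9 : Int × List String := (3, ["18", "23", "997"])

def Spec_is_divisible_by_9 (t : Int) (test_cases : List String) (out : List String) : Prop := out = is_divisible_by_9_alt t test_cases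
instance (t : Int) (test_cases : List String) (out : List String) : Decidable (Spec_is_divisible_by_9 t test_cases out) := by unfold Spec_is_divisible_by_9; infer_instance

-- ===== CLAIM (what is proved, stated in full; the proofs are below) =====
def Claim_equal_is_divisible_by_9 : Prop := ∀ (t : Int) (test_cases : List String), Dom_is_divisible_by_9 t test_cases → Pre_is_divisible_by_9 t test_cases → Spec_is_divisible_by_9 t test_cases (is_divisible_by_9 t test_cases)

-- ===== LEMMAS AND PROOFS =====

-- every digit character is one of the ten literals
lemma digit_mem (c : Char) (h : c.isDigit = true) :
    c ∈ ['0', '1', '2', '3', '4', '5', '6', '7', '8', '9'] := by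
  have hb : 48 ≤ c.toNat ∧ c.toNat ≤ 57 := by
    simp [Char.isDigit, UInt32.le_iff_toNat_le] at h
    exact h
  have hc : c = Char.ofNat c.toNat := (Char.ofNat_toNat c).symm
  obtain ⟨h1, h2⟩ := hb
  interval_cases h3 : c.toNat <;> rw [hc] <;> decide

-- the inner search equals B's closed-form test when the digit sum is not ≡ 0 (mod 9)
lemma innerA_closed (ds : Int) (cs : List Char)
    (hd : ∀ c ∈ cs, c.isDigit = true) (h9 : PySem.Int.mod ds 9 ≠ 0) :
    pvInnerA ds cs =
      ((cs.contains '2' && decide (PySem.Int.mod (ds + 2) 9 = 0)) ||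
       (cs.contains '3' && decide (PySem.Int.mod (ds + 6) 9 = 0))) := by
  induction cs with
  | nil => simp [pvInnerA]
  | cons c rest ih =>
    have ih' := ih (fun x hx => hd x (List.mem_cons_of_mem _ hx))
    have hmem := digit_mem c (hd c (List.mem_cons_self))
    have h9' : ¬ (9:Int) ∣ ds := by
      simpa [PySem.Int.mod_eq_zero_iff_dvd] using h9
    fin_cases hmem <;>
      by_cases hp2 : (9:Int) ∣ ds + 2 <;>
      by_cases hp6 : (9:Int) ∣ ds + 6 <;>
      simp [pvInnerA, ih', h9', hp2, hp6,
        show pvDigit '0' = 0 from by decide, show pvDigit '1' = 1 from by decide,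
        show pvDigit '2' = 2 from by decide, show pvDigit '3' = 3 from by decide,
        show pvDigit '4' = 4 from by decide, show pvDigit '5' = 5 from by decide,
        show pvDigit '6' = 6 from by decide, show pvDigit '7' = 7 from by decide,
        show pvDigit '8' = 8 from by decide, show pvDigit '9' = 9 from by decide,
        show (ds : Int) - 2 + 4 = ds + 2 from by ring,
        show (ds : Int) - 3 + 9 = ds + 6 from by ring,
        show (ds : Int) - 1 + 1 * 1 = ds from by ring]

-- A's running digit sum equals B's sum-of-map
lemma foldl_digit_sum (cs : List Char) (a : Int) :
    cs.foldl (fun acc c => acc + pvDigit c) a = a + (cs.map pvDigit).sum := by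
  induction cs generalizing a with
  | nil => simp
  | cons c rest ih => simp [List.foldl, ih]; ring

-- A's per-string verdict equals B's
lemma verdict_eq (n : String) (hd : ∀ c ∈ n.toList, c.isDigit = true) :
    (let ds := n.toList.foldl (fun acc c => acc + pvDigit c) 0
     if PySem.Int.mod ds 9 = 0 then "YES"
     else if pvInnerA ds n.toList then "YES"
     else "NO") = pvVerdictB n := by
  simp only [pvVerdictB, foldl_digit_sum, zero_add]
  by_cases h9 : (9:Int) ∣ (n.toList.map pvDigit).sum
  · simp [PySem.Int.mod_eq_zero_iff_dvd, h9]
  · have h9m : PySem.Int.mod ((n.toList.map pvDigit).sum) 9 ≠ 0 := by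
      simp [PySem.Int.mod_eq_zero_iff_dvd, h9]
    rw [innerA_closed _ _ hd h9m]
    by_cases m2 : '2' ∈ n.toList <;> by_cases m3 : '3' ∈ n.toList <;>
      by_cases h2 : (9:Int) ∣ ((n.toList.map pvDigit).sum + 2) <;>
      by_cases h3 : (9:Int) ∣ ((n.toList.map pvDigit).sum + 6) <;>
      simp [PySem.Int.mod_eq_zero_iff_dvd, h9, m2, m3, h2, h3]

-- A's whole loop, with accumulator, equals append of B's map
lemma loopA_eq : ∀ (l : List String), (∀ s ∈ l, ∀ c ∈ s.toList, c.isDigit = true) →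
    ∀ acc : List String,
      l.foldl
        (fun results n =>
          let ds := n.toList.foldl (fun acc c => acc + pvDigit c) 0
          if PySem.Int.mod ds 9 = 0 then results ++ ["YES"]
          else if pvInnerA ds n.toList then results ++ ["YES"]
          else results ++ ["NO"]) acc = acc ++ l.map pvVerdictB := by
  intro l
  induction l with
  | nil => intro _ acc; simp
  | cons n rest ih =>
    intro hpre acc
    have hv := verdict_eq n (hpre n (List.mem_cons_self))
    simp only at hv
    rw [List.foldl_cons, List.map_cons,
        ih (fun s hs => hpre s (List.mem_cons_of_mem _ hs))]
    have hstep :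
        (let ds := n.toList.foldl (fun acc c => acc + pvDigit c) 0
         if PySem.Int.mod ds 9 = 0 then acc ++ ["YES"]
         else if pvInnerA ds n.toList then acc ++ ["YES"]
         else acc ++ ["NO"]) = acc ++ [pvVerdictB n] := by
      rw [← hv]
      simp only
      split_ifs <;> rfl
    simp only at hstep
    rw [hstep, List.append_cons, List.append_assoc]
    simp

-- ===== VERDICT (by name: the statement is the Claim_ definition above) =====
theorem is_divisible_by_9_spec : Claim_equal_is_divisible_by_9 := by
  intro t test_cases _hdom hpre
  have hpre' : ∀ s ∈ test_cases, ∀ c ∈ s.toList, c.isDigit = true := by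
    simpa [List.all_eq_true, Pre_is_divisible_by_9] using hpre
  unfold Spec_is_divisible_by_9 is_divisible_by_9 is_divisible_by_9_alt
  simpa using loopA_eq test_cases hpre' []
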